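-- pv_equiv track=rewrite | github.com/Osama-Elzekred/PY-Problems | ICPC/recrsion/K - 23 out of 5.py | solve
-- ===== SOURCE A (Python) =====
-- def solve(nums):
--     expressions = ["+", "*", "-"]
--
--     def rec(idx, total):
--         if idx == 5:
--             return total == 23
--
--         # newnum = nums[idx]
--
--         found = 0
--         for exp in expressions:
--             if exp == '+' and not found:
--                 found = rec(idx+1, total+nums[idx])
--             if exp == '*' and not found:
--                 found = rec(idx+1, total*nums[idx])
--             if exp == '-' and not found:
--                 found = rec(idx+1, total-nums[idx])
--         return found
--         # return rec(idx+1, total+newnum) or rec(idx+1, total-newnum) or rec(idx+1, total*newnum)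
--
--     return rec(1, nums[0])
-- ===== SOURCE B (Python) =====
-- def solve(nums):
--     reachable = {nums[0]}
--     for i in range(1, 5):
--         n = nums[i]
--         reachable = ({t + n for t in reachable}
--                      | {t * n for t in reachable}
--                      | {t - n for t in reachable})
--     return 23 in reachable
-- ===== Notes on version B (the rewrite author's own statement) =====
-- stated objective: alternative
-- what changed: Replaces the recursive short-circuiting DFS over operator choices with an iterative forward propagation of the set of reachable totals, testing membership of 23 at the end.
import Mathlib
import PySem

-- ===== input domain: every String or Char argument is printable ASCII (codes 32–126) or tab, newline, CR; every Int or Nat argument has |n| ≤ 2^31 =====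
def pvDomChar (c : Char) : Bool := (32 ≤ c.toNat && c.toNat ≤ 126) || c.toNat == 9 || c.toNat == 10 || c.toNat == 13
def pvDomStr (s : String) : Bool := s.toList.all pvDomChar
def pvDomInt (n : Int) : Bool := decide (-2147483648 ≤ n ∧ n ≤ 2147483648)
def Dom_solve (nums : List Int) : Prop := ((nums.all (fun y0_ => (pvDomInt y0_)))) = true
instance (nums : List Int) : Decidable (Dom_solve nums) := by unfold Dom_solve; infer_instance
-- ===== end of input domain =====

-- B replaces A's recursive short-circuit DFS by an iterative set of reachable totals (alternative decomposition).

-- ===== PORT A =====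
-- rec(idx, total), fuel = 5 - idx; the `found` chain is kept step for step.
-- nums[idx] is pyGetD (Pre_solve guarantees the index is in range, matching Python's nums[idx]).
def solveRec (nums : List Int) : Nat → Int → Int → Bool
  | 0, _, total => total == 23
  | f+1, idx, total =>
      let found := solveRec nums f (idx+1) (total + PySem.List.pyGetD nums idx 0)
      let found := if !found then solveRec nums f (idx+1) (total * PySem.List.pyGetD nums idx 0) else found
      let found := if !found then solveRec nums f (idx+1) (total - PySem.List.pyGetD nums idx 0) else found
      found

def solve (nums : List Int) : Bool := solveRec nums 4 1 (PySem.List.pyGetD nums 0 0)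

-- ===== PORT B =====
def stepB (nums : List Int) (reachable : PySem.Set Int) (i : Int) : PySem.Set Int :=
  let n := PySem.List.pyGetD nums i 0
  PySem.Set.union
    (PySem.Set.union (PySem.Set.ofList (reachable.map (fun t => t + n)))
      (reachable.map (fun t => t * n)))
    (reachable.map (fun t => t - n))

def solve_alt (nums : List Int) : Bool :=
  let reachable : PySem.Set Int := PySem.Set.ofList [PySem.List.pyGetD nums 0 0]
  let reachable := (PySem.List.pyRange 1 5 1).foldl (stepB nums) reachable
  reachable.contains 23

-- ===== PRECONDITION & SPEC =====
-- Pre_ excludes lists of fewer than 5 elements, on which Python A raises IndexError.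
def Pre_solve (nums : List Int) : Prop := 5 ≤ nums.length
instance (nums : List Int) : Decidable (Pre_solve nums) := by unfold Pre_solve; infer_instance

def pvWitness_solve : List Int := [1, 2, 3, 4, 5]

def Spec_solve (nums : List Int) (out : Bool) : Prop := out = solve_alt nums
instance (nums : List Int) (out : Bool) : Decidable (Spec_solve nums out) := by unfold Spec_solve; infer_instance

-- ===== CLAIM (what is proved, stated in full; the proofs are below) =====
def Claim_equal_solve : Prop := ∀ (nums : List Int), Dom_solve nums → Pre_solve nums → Spec_solve nums (solve nums)

-- ===== LEMMAS AND PROOFS =====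

-- A's `found` chain is a three-way Boolean or.
theorem solveRec_succ (nums : List Int) (f : Nat) (idx total : Int) :
    solveRec nums (f+1) idx total =
      (solveRec nums f (idx+1) (total + PySem.List.pyGetD nums idx 0) ||
       solveRec nums f (idx+1) (total * PySem.List.pyGetD nums idx 0) ||
       solveRec nums f (idx+1) (total - PySem.List.pyGetD nums idx 0)) := by
  simp only [solveRec]
  cases solveRec nums f (idx+1) (total + PySem.List.pyGetD nums idx 0) <;>
    cases solveRec nums f (idx+1) (total * PySem.List.pyGetD nums idx 0) <;>
      cases solveRec nums f (idx+1) (total - PySem.List.pyGetD nums idx 0) <;> rfl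

theorem mem_stepB (nums : List Int) (S : PySem.Set Int) (i u : Int) :
    u ∈ stepB nums S i ↔ ∃ t ∈ S,
      u = t + PySem.List.pyGetD nums i 0 ∨ u = t * PySem.List.pyGetD nums i 0 ∨
      u = t - PySem.List.pyGetD nums i 0 := by
  simp only [stepB, PySem.Set.mem_union, PySem.Set.mem_ofList, List.mem_map]
  constructor
  · rintro ((⟨t, ht, rfl⟩ | ⟨t, ht, rfl⟩) | ⟨t, ht, rfl⟩) <;> exact ⟨t, ht, by tauto⟩
  · rintro ⟨t, ht, rfl | rfl | rfl⟩
    · exact Or.inl (Or.inl ⟨t, ht, rfl⟩)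
    · exact Or.inl (Or.inr ⟨t, ht, rfl⟩)
    · exact Or.inr ⟨t, ht, rfl⟩

-- Forward set propagation from S over indices idx..idx+f-1 reaches 23 iff A's DFS succeeds from some total in S.
theorem key_lemma (nums : List Int) :
    ∀ (f : Nat) (idx : Int) (S : PySem.Set Int),
      ((23 : Int) ∈ (PySem.List.pyRange idx (idx + (f : Int)) 1).foldl (stepB nums) S) ↔
        ∃ t ∈ S, solveRec nums f idx t = true := by
  intro f
  induction f with
  | zero =>
      intro idx S
      rw [show idx + ((0:Nat):Int) = idx by omega, PySem.List.pyRange_one_eq_nil le_rfl]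
      simp only [List.foldl_nil, solveRec, beq_iff_eq]
      constructor
      · exact fun h => ⟨23, h, rfl⟩
      · rintro ⟨t, ht, rfl⟩; exact ht
  | succ f ih =>
      intro idx S
      rw [show idx + ((f+1:Nat):Int) = (idx + 1) + (f : Int) by push_cast; ring,
        PySem.List.pyRange_one_cons (by omega : idx < idx + 1 + (f : Int)), List.foldl_cons]
      rw [ih (idx + 1) (stepB nums S idx)]
      constructor
      · rintro ⟨u, hu, hrec⟩
        rcases (mem_stepB nums S idx u).1 hu with ⟨t, ht, h⟩
        refine ⟨t, ht, ?_⟩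
        rw [solveRec_succ]
        rcases h with rfl | rfl | rfl <;> simp [hrec]
      · rintro ⟨t, ht, hrec⟩
        rw [solveRec_succ] at hrec
        rcases Bool.or_eq_true_iff.1 hrec with h | h
        · rcases Bool.or_eq_true_iff.1 h with h | h
          · exact ⟨_, (mem_stepB nums S idx _).2 ⟨t, ht, Or.inl rfl⟩, h⟩
          · exact ⟨_, (mem_stepB nums S idx _).2 ⟨t, ht, Or.inr (Or.inl rfl)⟩, h⟩
        · exact ⟨_, (mem_stepB nums S idx _).2 ⟨t, ht, Or.inr (Or.inr rfl)⟩, h⟩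

-- ===== VERDICT (by name: the statement is the Claim_ definition above) =====
theorem solve_spec : Claim_equal_solve := by
  intro nums _ _
  unfold Spec_solve solve solve_alt
  rw [Bool.eq_iff_iff, PySem.Set.contains_iff]
  have h := key_lemma nums 4 1 (PySem.Set.ofList [PySem.List.pyGetD nums 0 0])
  rw [show (1 : Int) + ((4:Nat):Int) = 5 by norm_num] at h
  rw [h]
  constructor
  · intro hrec
    exact ⟨_, by rw [PySem.Set.mem_ofList]; exact List.mem_singleton_self _, hrec⟩
  · rintro ⟨t, ht, hrec⟩
    rw [PySem.Set.mem_ofList, List.mem_singleton] at ht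
    rw [ht] at hrec; exact hrec
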